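-- pv_equiv track=rewrite | github.com/quasaricj/merchant_dta-cleaner-v1 | src/core/processing_engine.py | _choose_best_social_link
-- ===== SOURCE A (Python) =====
-- from typing import List, Dict, Optional, Any, Callable
--
-- def _choose_best_social_link(candidates: List[str]) -> Optional[str]:
--     """
--     From a list of social media URLs, picks the best one.
--     For now, this is a simple "first is best" implementation.
--     Future enhancement could involve more logic (e.g., matching profile name).
--     """
--     if not candidates:
--         return None
--     # Simple heuristic: prefer well-known platforms
--     for platform in ["facebook", "linkedin", "instagram", "twitter"]:
--         for url in candidates:
--             if platform in url:
--                 return url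
--     return candidates[0]
-- ===== SOURCE B (Python) =====
-- def _choose_best_social_link(candidates):
--     """Single pass: pick the candidate with the smallest platform-priority rank."""
--     if not candidates:
--         return None
--     platforms = ["facebook", "linkedin", "instagram", "twitter"]
--     best = candidates[0]
--     best_rank = len(platforms) + 1  # "infinity": anything beats it
--     for url in candidates:
--         rank = next((i for i, p in enumerate(platforms) if p in url), len(platforms))
--         if rank < best_rank:
--             best = url
--             best_rank = rank
--     return best
-- ===== Notes on version B (the rewrite author's own statement) =====
-- stated objective: simpler
-- what changed: Replaced the nested platform-by-platform rescans of the candidate list with a single pass that assigns each URL its best platform-priority rank and keeps the first URL of minimal rank.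
import Mathlib
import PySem

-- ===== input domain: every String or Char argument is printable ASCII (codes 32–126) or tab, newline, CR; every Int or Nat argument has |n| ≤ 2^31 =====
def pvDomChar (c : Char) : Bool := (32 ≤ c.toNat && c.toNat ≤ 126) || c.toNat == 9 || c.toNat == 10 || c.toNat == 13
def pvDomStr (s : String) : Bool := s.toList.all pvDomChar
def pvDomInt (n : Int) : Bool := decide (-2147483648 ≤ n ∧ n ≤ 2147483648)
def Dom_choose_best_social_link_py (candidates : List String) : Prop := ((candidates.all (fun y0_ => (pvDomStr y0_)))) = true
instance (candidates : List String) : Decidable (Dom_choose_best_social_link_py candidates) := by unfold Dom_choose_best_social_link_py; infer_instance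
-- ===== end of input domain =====

-- B replaces A's nested platform-by-platform rescans with one pass keeping the first URL of minimal platform-priority rank (objective: simpler).

-- ===== PORT A =====
-- the platform priority list (the same literal in A and B)
def pvPlatforms : List String := ["facebook", "linkedin", "instagram", "twitter"]

-- inner loop: 'for url in candidates: if platform in url: return url'
def pvAInner (platform : String) (candidates : List String) : Option String :=
  candidates.find? (fun url => PySem.Str.isIn platform url)

-- outer loop over the platform list
def pvAOuter : List String → List String → Option String
  | [], _ => none
  | p :: ps, cs =>
    match pvAInner p cs with
    | some u => some u
    | none => pvAOuter ps cs

def choose_best_social_link_py (candidates : List String) : Option String :=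
  if candidates.isEmpty then none
  else
    match pvAOuter pvPlatforms candidates with
    | some u => some u
    | none => PySem.List.pyGet? candidates 0

-- ===== PORT B =====

-- rank = next((i for i, p in enumerate(platforms) if p in url), len(platforms))
def pvRank (url : String) : Int :=
  match (PySem.List.enumerate pvPlatforms 0).find? (fun ip => PySem.Str.isIn ip.2 url) with
  | some ip => ip.1
  | none => (pvPlatforms.length : Int)

-- the single pass: 'for url in candidates: ... if rank < best_rank: best, best_rank = url, rank'
def pvBLoop : List String → String → Int → String
  | [], best, _ => best
  | u :: us, best, best_rank =>
    let r := pvRank u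
    if r < best_rank then pvBLoop us u r else pvBLoop us best best_rank

def choose_best_social_link_py_alt (candidates : List String) : Option String :=
  match candidates with
  | [] => none
  | c :: _ => some (pvBLoop candidates c ((pvPlatforms.length : Int) + 1))

-- ===== PRECONDITION & SPEC =====
def Spec_choose_best_social_link_py (candidates : List String) (out : Option String) : Prop := out = choose_best_social_link_py_alt candidates
instance (candidates : List String) (out : Option String) : Decidable (Spec_choose_best_social_link_py candidates out) := by unfold Spec_choose_best_social_link_py; infer_instance

-- ===== CLAIM (what is proved, stated in full; the proofs are below) =====
def Claim_equal_choose_best_social_link_py : Prop := ∀ (candidates : List String), Dom_choose_best_social_link_py candidates → Spec_choose_best_social_link_py candidates (choose_best_social_link_py candidates)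

-- ===== LEMMAS AND PROOFS =====

theorem pvNotTrue {b : Bool} (h : b = false) : ¬ (b = true) := by simp [h]

-- rank in closed if-form
theorem pvRank_eq (u : String) : pvRank u =
    if PySem.Str.isIn "facebook" u then 0
    else if PySem.Str.isIn "linkedin" u then 1
    else if PySem.Str.isIn "instagram" u then 2
    else if PySem.Str.isIn "twitter" u then 3
    else 4 := by
  simp [pvRank, pvPlatforms, PySem.List.enumerate, List.find?]
  split_ifs <;> simp_all

theorem pvRank_nonneg (u : String) : 0 ≤ pvRank u := by
  rw [pvRank_eq]; split_ifs <;> omega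

theorem pvRank_le_four (u : String) : pvRank u ≤ 4 := by
  rw [pvRank_eq]; split_ifs <;> omega

-- the minimal rank occurring in a list (4 if none smaller occurs)
def pvMinR (l : List String) : Int := l.foldr (fun u a => min (pvRank u) a) 4

theorem pvMinR_le : ∀ (l : List String) (u : String), u ∈ l → pvMinR l ≤ pvRank u := by
  intro l
  induction l with
  | nil => intro u hu; cases hu
  | cons c cs ih =>
    intro u hu
    rcases List.mem_cons.mp hu with h | h
    · subst h; simp [pvMinR]
    · have := ih u h
      simp only [pvMinR, List.foldr] at *
      omega

theorem pvMinR_le_four (l : List String) : pvMinR l ≤ 4 := by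
  induction l with
  | nil => simp [pvMinR]
  | cons c cs ih => simp only [pvMinR, List.foldr] at *; omega

theorem pvMinR_nonneg (l : List String) : 0 ≤ pvMinR l := by
  induction l with
  | nil => simp [pvMinR]
  | cons c cs ih =>
    have := pvRank_nonneg c
    simp only [pvMinR, List.foldr] at *
    omega

theorem pvMinR_mem : ∀ (l : List String), l ≠ [] → ∃ u ∈ l, pvRank u = pvMinR l := by
  intro l
  induction l with
  | nil => intro h; exact absurd rfl h
  | cons c cs ih =>
    intro _
    by_cases hcs : cs = []
    · subst hcs
      refine ⟨c, List.mem_cons_self, ?_⟩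
      have := pvRank_le_four c
      simp only [pvMinR, List.foldr]
      omega
    · rcases ih hcs with ⟨u, hu, hru⟩
      by_cases hle : pvRank c ≤ pvMinR cs
      · refine ⟨c, List.mem_cons_self, ?_⟩
        simp only [pvMinR, List.foldr] at *
        omega
      · refine ⟨u, List.mem_cons_of_mem _ hu, ?_⟩
        simp only [pvMinR, List.foldr] at *
        omega

-- find? with member-wise equal predicates
theorem pvFind?_congr_mem {α : Type} {p q : α → Bool} : ∀ {l : List α}, (∀ x ∈ l, p x = q x) → l.find? p = l.find? q := by
  intro l
  induction l with
  | nil => intro _; rfl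
  | cons c cs ih =>
    intro h
    simp only [List.find?, h c List.mem_cons_self]
    cases q c
    · exact ih fun x hx => h x (List.mem_cons_of_mem _ hx)
    · rfl

theorem pvFind?_ne_none {l : List String} {m : Int} (h : ∃ u ∈ l, pvRank u = m) :
    l.find? (fun u => pvRank u == m) ≠ none := by
  rcases h with ⟨u, hu, hru⟩
  intro hnone
  rw [List.find?_eq_none] at hnone
  exact hnone u hu (by simp [hru])

-- B's loop: no update when nothing beats best_rank
theorem pvBLoop_stay : ∀ (cs : List String) (b : String) (rb : Int), (∀ u ∈ cs, rb ≤ pvRank u) → pvBLoop cs b rb = b := by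
  intro cs
  induction cs with
  | nil => intro b rb _; rfl
  | cons c cs ih =>
    intro b rb h
    have hc := h c List.mem_cons_self
    simp only [pvBLoop]
    rw [if_neg (by omega : ¬ pvRank c < rb)]
    exact ih b rb fun u hu => h u (List.mem_cons_of_mem _ hu)

-- B's loop returns the first element of the overall minimal rank m when m < best_rank
theorem pvBLoop_min : ∀ (cs : List String) (b : String) (rb m : Int), m < rb →
    (∀ u ∈ cs, m ≤ pvRank u) → (∃ u ∈ cs, pvRank u = m) →
    pvBLoop cs b rb = (cs.find? (fun u => pvRank u == m)).getD b := by
  intro cs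
  induction cs with
  | nil =>
    intro b rb m _ _ hex
    rcases hex with ⟨u, hu, _⟩; cases hu
  | cons c cs ih =>
    intro b rb m hm hle hex
    by_cases hc : pvRank c = m
    · have hlt : pvRank c < rb := by omega
      simp only [pvBLoop]
      rw [if_pos hlt, List.find?_cons_of_pos (by simp [hc])]
      rw [pvBLoop_stay cs c (pvRank c) (fun u hu => by have := hle u (List.mem_cons_of_mem _ hu); omega)]
      rfl
    · have hne : ((fun u => pvRank u == m) c) = false := by simp [hc]
      have hex' : ∃ u ∈ cs, pvRank u = m := by
        rcases hex with ⟨u, hu, hru⟩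
        rcases List.mem_cons.mp hu with hu | hu
        · subst hu; exact absurd hru hc
        · exact ⟨u, hu, hru⟩
      have hle' : ∀ u ∈ cs, m ≤ pvRank u := fun u hu => hle u (List.mem_cons_of_mem _ hu)
      rw [show List.find? (fun u => pvRank u == m) (c :: cs) = List.find? (fun u => pvRank u == m) cs from
        List.find?_cons_of_neg (pvNotTrue hne)]
      simp only [pvBLoop]
      by_cases hlt : pvRank c < rb
      · rw [if_pos hlt, ih c (pvRank c) m (by have := hle c List.mem_cons_self; omega) hle' hex']
        obtain ⟨v, hv⟩ := Option.ne_none_iff_exists'.mp (pvFind?_ne_none hex')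
        rw [hv]
        rfl
      · rw [if_neg hlt]
        exact ih b rb m hm hle' hex'

-- no member contains a platform whose index is below the minimal rank
theorem pvNoFb {l : List String} (h : 1 ≤ pvMinR l) {u : String} (hu : u ∈ l) : PySem.Str.isIn "facebook" u = false := by
  cases hf : PySem.Str.isIn "facebook" u
  · rfl
  · have hm := pvMinR_le l u hu
    rw [pvRank_eq, if_pos hf] at hm
    omega

theorem pvNoLi {l : List String} (h : 2 ≤ pvMinR l) {u : String} (hu : u ∈ l) : PySem.Str.isIn "linkedin" u = false := by
  cases hf : PySem.Str.isIn "linkedin" u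
  · rfl
  · have hm := pvMinR_le l u hu
    rw [pvRank_eq] at hm
    split_ifs at hm <;> omega

theorem pvNoIg {l : List String} (h : 3 ≤ pvMinR l) {u : String} (hu : u ∈ l) : PySem.Str.isIn "instagram" u = false := by
  cases hf : PySem.Str.isIn "instagram" u
  · rfl
  · have hm := pvMinR_le l u hu
    rw [pvRank_eq] at hm
    split_ifs at hm <;> omega

theorem pvNoTw {l : List String} (h : 4 ≤ pvMinR l) {u : String} (hu : u ∈ l) : PySem.Str.isIn "twitter" u = false := by
  cases hf : PySem.Str.isIn "twitter" u
  · rfl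
  · have hm := pvMinR_le l u hu
    rw [pvRank_eq] at hm
    split_ifs at hm <;> omega

-- one link of A's chain: when the current platform's containment coincides (member-wise) with having
-- the minimal rank, the chain stops here with the same result as the single minimal-rank search
theorem pvChain_step {l : List String} {m : Int} {plat : String} (rest : Option String)
    (hpt : ∀ u ∈ l, (fun url => PySem.Str.isIn plat url) u = (fun u => pvRank u == m) u)
    (hex : ∃ u ∈ l, pvRank u = m) :
    (match l.find? (fun url => PySem.Str.isIn plat url) with
     | some u => some u
     | none => rest) = l.find? (fun u => pvRank u == m) := by
  rw [pvFind?_congr_mem hpt]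
  obtain ⟨v, hv⟩ := Option.ne_none_iff_exists'.mp (pvFind?_ne_none hex)
  rw [hv]

-- A's platform chain equals a single search for the minimal rank (or none if the minimum is 4)
theorem pvAOuter_eq (l : List String) :
    pvAOuter pvPlatforms l =
      (if pvMinR l = 4 then none else l.find? (fun u => pvRank u == pvMinR l)) := by
  have h4 := pvMinR_le_four l
  have h0' := pvMinR_nonneg l
  simp only [pvPlatforms, pvAOuter, pvAInner]
  by_cases h0 : pvMinR l = 0
  · rw [if_neg (by omega)]
    refine pvChain_step _ ?_ (pvMinR_mem l ?_)
    · intro u _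
      show PySem.Str.isIn "facebook" u = (pvRank u == pvMinR l)
      rw [h0, pvRank_eq]
      cases hf : PySem.Str.isIn "facebook" u
      · simp; split_ifs <;> decide
      · simp
    · rintro rfl; simp [pvMinR] at h0
  · have h1 : 1 ≤ pvMinR l := by omega
    have hfb : l.find? (fun url => PySem.Str.isIn "facebook" url) = none :=
      List.find?_eq_none.2 (fun u hu => pvNotTrue (pvNoFb h1 hu))
    simp only [hfb]
    by_cases h1e : pvMinR l = 1
    · rw [if_neg (by omega)]
      refine pvChain_step _ ?_ (pvMinR_mem l ?_)
      · intro u hu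
        show PySem.Str.isIn "linkedin" u = (pvRank u == pvMinR l)
        rw [h1e, pvRank_eq, if_neg (pvNotTrue (pvNoFb h1 hu))]
        cases hf : PySem.Str.isIn "linkedin" u
        · simp; split_ifs <;> decide
        · simp
      · rintro rfl; simp [pvMinR] at h1e
    · have h2 : 2 ≤ pvMinR l := by omega
      have hli : l.find? (fun url => PySem.Str.isIn "linkedin" url) = none :=
        List.find?_eq_none.2 (fun u hu => pvNotTrue (pvNoLi h2 hu))
      simp only [hli]
      by_cases h2e : pvMinR l = 2
      · rw [if_neg (by omega)]
        refine pvChain_step _ ?_ (pvMinR_mem l ?_)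
        · intro u hu
          show PySem.Str.isIn "instagram" u = (pvRank u == pvMinR l)
          rw [h2e, pvRank_eq, if_neg (pvNotTrue (pvNoFb h1 hu)), if_neg (pvNotTrue (pvNoLi h2 hu))]
          cases hf : PySem.Str.isIn "instagram" u
          · simp; split_ifs <;> decide
          · simp
        · rintro rfl; simp [pvMinR] at h2e
      · have h3 : 3 ≤ pvMinR l := by omega
        have hig : l.find? (fun url => PySem.Str.isIn "instagram" url) = none :=
          List.find?_eq_none.2 (fun u hu => pvNotTrue (pvNoIg h3 hu))
        simp only [hig]
        by_cases h3e : pvMinR l = 3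
        · rw [if_neg (by omega)]
          refine pvChain_step _ ?_ (pvMinR_mem l ?_)
          · intro u hu
            show PySem.Str.isIn "twitter" u = (pvRank u == pvMinR l)
            rw [h3e, pvRank_eq, if_neg (pvNotTrue (pvNoFb h1 hu)), if_neg (pvNotTrue (pvNoLi h2 hu)),
              if_neg (pvNotTrue (pvNoIg h3 hu))]
            cases hf : PySem.Str.isIn "twitter" u <;> simp
          · rintro rfl; simp [pvMinR] at h3e
        · have h4e : pvMinR l = 4 := by omega
          have htw : l.find? (fun url => PySem.Str.isIn "twitter" url) = none :=
            List.find?_eq_none.2 (fun u hu => pvNotTrue (pvNoTw (by omega) hu))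
          simp only [htw]
          rw [if_pos h4e]

-- ===== VERDICT (by name: the statement is the Claim_ definition above) =====
theorem choose_best_social_link_py_spec : Claim_equal_choose_best_social_link_py := by
  unfold Claim_equal_choose_best_social_link_py
  intro candidates _
  unfold Spec_choose_best_social_link_py
  rcases candidates with _ | ⟨c, cs⟩
  · rfl
  · have hne : (c :: cs : List String) ≠ [] := by simp
    have hmem := pvMinR_mem (c :: cs) hne
    have hle : ∀ u ∈ c :: cs, pvMinR (c :: cs) ≤ pvRank u := fun u hu => pvMinR_le (c :: cs) u hu
    have hloop := pvBLoop_min (c :: cs) c ((pvPlatforms.length : Int) + 1) (pvMinR (c :: cs))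
      (by have := pvMinR_le_four (c :: cs); simp only [pvPlatforms, List.length_cons, List.length_nil]; omega)
      hle hmem
    simp only [choose_best_social_link_py, choose_best_social_link_py_alt, List.isEmpty_cons,
      Bool.false_eq_true, if_false, pvAOuter_eq, hloop]
    by_cases h4 : pvMinR (c :: cs) = 4
    · rw [if_pos h4]
      have hc4 : pvRank c = 4 := by
        have := hle c List.mem_cons_self
        have := pvRank_le_four c
        omega
      rw [List.find?_cons_of_pos (by simp [hc4, h4])]
      simp [PySem.List.pyGet?, PySem.List.pyIdx?]
    · rw [if_neg h4]
      obtain ⟨v, hv⟩ := Option.ne_none_iff_exists'.mp (pvFind?_ne_none hmem)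
      rw [hv]
      rfl
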